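-- pv_equiv track=rewrite | github.com/fiskenslakt/aoc-2017 | p04.py | no_anagrams
-- ===== SOURCE A (Python) =====
-- from collections import Counter
--
-- def no_anagrams(passphrase):
--     words = passphrase.split()
--     letter_frequencies = set()
--
--     for word in words:
--         letter_frequencies.add(
--             tuple(sorted(Counter(word).items()))
--         )
--
--     return len(words) == len(letter_frequencies)
-- ===== SOURCE B (Python) =====
-- def no_anagrams(passphrase):
--     sigs = sorted(tuple(sorted(word)) for word in passphrase.split())
--     return all(x != y for x, y in zip(sigs, sigs[1:]))
-- ===== Notes on version B (the rewrite author's own statement) =====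
-- stated objective: alternative
-- what changed: Replaces the hash-set of sorted Counter-item tuples (distinct-count comparison) by sorting the list of sorted-letter signatures and scanning consecutive pairs for an equal adjacent pair.
import Mathlib
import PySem

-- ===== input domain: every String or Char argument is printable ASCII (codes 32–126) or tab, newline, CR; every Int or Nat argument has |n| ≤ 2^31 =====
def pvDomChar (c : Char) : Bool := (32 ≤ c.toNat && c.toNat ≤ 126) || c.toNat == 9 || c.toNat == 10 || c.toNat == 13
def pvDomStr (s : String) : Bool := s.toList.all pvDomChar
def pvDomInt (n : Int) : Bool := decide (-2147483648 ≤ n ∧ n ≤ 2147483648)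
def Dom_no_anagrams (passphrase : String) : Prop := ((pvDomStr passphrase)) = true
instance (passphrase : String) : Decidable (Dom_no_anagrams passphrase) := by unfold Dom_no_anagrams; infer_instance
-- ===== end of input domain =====

-- B replaces A's hash-set of sorted Counter-item tuples by sorting the list of
-- sorted-letter signatures and scanning consecutive pairs (alternative decomposition, same exact result).

-- ===== PORT A =====
-- tuple(sorted(Counter(word).items())) — Python sorts the (char, count) pairs lexicographically
def sigCounter (w : List Char) : List (Char × Int) :=
  PySem.List.sorted2 (PySem.Dict.counter w).items (fun p => p.1) (fun p => p.2) false

def no_anagrams (passphrase : String) : Bool :=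
  let words := PySem.Str.split₀ passphrase
  let letter_frequencies :=
    words.foldl (fun s word => PySem.Set.add s (sigCounter word.toList)) PySem.Set.empty
  words.length == letter_frequencies.length

-- ===== PORT B =====
-- tuple(sorted(word))
def sigSorted (w : List Char) : List Char :=
  PySem.List.sorted w (fun c => c) false

def no_anagrams_alt (passphrase : String) : Bool :=
  let sigs := PySem.List.sorted
    ((PySem.Str.split₀ passphrase).map (fun word => sigSorted word.toList)) (fun s => s) false
  (sigs.zip (PySem.List.slice sigs (some 1) none)).all (fun p => !(p.1 == p.2))

-- ===== PRECONDITION & SPEC =====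
def Spec_no_anagrams (passphrase : String) (out : Bool) : Prop := out = no_anagrams_alt passphrase
instance (passphrase : String) (out : Bool) : Decidable (Spec_no_anagrams passphrase out) := by unfold Spec_no_anagrams; infer_instance

-- ===== CLAIM (what is proved, stated in full; the proofs are below) =====
def Claim_equal_no_anagrams : Prop := ∀ (passphrase : String), Dom_no_anagrams passphrase → Spec_no_anagrams passphrase (no_anagrams passphrase)

-- ===== LEMMAS AND PROOFS =====

-- the number of distinct elements equals the length iff the list has no duplicates
theorem pv_len_ofList_eq_iff {α : Type} [BEq α] [LawfulBEq α] [DecidableEq α] (xs : List α) :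
    (PySem.Set.ofList xs).length = xs.length ↔ xs.Nodup := by
  have hperm : (PySem.Set.ofList xs).Perm xs.dedup := by
    rw [List.perm_ext_iff_of_nodup (PySem.Set.nodup_ofList xs) xs.nodup_dedup]
    intro a; simp [PySem.Set.mem_ofList]
  constructor
  · intro h
    have hlen : xs.dedup.length = xs.length := by
      rw [← hperm.length_eq, h]
    have := (xs.dedup_sublist).eq_of_length hlen
    rw [← this]; exact xs.nodup_dedup
  · intro h
    rw [PySem.Set.ofList_eq_self_of_nodup xs h]

-- the lexicographic order sorted2 establishes on the (char, count) pairs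
def pvLexLe (a b : Char × Int) : Prop := a.1 < b.1 ∨ (a.1 = b.1 ∧ a.2 ≤ b.2)

theorem pvLexLe_trans {a b c : Char × Int} (h1 : pvLexLe a b) (h2 : pvLexLe b c) : pvLexLe a c := by
  unfold pvLexLe at *
  rcases h1 with h1 | ⟨e1, l1⟩ <;> rcases h2 with h2 | ⟨e2, l2⟩
  · exact Or.inl (lt_trans h1 h2)
  · exact Or.inl (e2 ▸ h1)
  · exact Or.inl (e1 ▸ h2)
  · exact Or.inr ⟨e1.trans e2, le_trans l1 l2⟩

theorem pvLexLe_of_not_before {a b : Char × Int}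
    (h : (decide (a.1 < b.1) || (!decide (b.1 < a.1) && decide (a.2 < b.2))) = false) : pvLexLe b a := by
  simp only [Bool.or_eq_false_iff, Bool.and_eq_false_iff, decide_eq_false_iff_not,
    Bool.not_eq_false', decide_eq_true_eq] at h
  obtain ⟨h1, h2⟩ := h
  rcases h2 with h2 | h2
  · exact Or.inl h2
  · rcases lt_trichotomy b.1 a.1 with hl | he | hg
    · exact Or.inl hl
    · exact Or.inr ⟨he, by omega⟩
    · exact absurd hg h1

theorem pvLexLe_of_before {a b : Char × Int}
    (h : (decide (a.1 < b.1) || (!decide (b.1 < a.1) && decide (a.2 < b.2))) = true) : pvLexLe a b := by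
  simp only [Bool.or_eq_true, Bool.and_eq_true, decide_eq_true_eq, Bool.not_eq_true',
    decide_eq_false_iff_not] at h
  rcases h with h | ⟨h1, h2⟩
  · exact Or.inl h
  · rcases lt_trichotomy a.1 b.1 with hl | he | hg
    · exact Or.inl hl
    · exact Or.inr ⟨he, le_of_lt h2⟩
    · exact absurd hg h1

theorem pv_insertBy_lex_pairwise (x : Char × Int) (ys : List (Char × Int))
    (h : ys.Pairwise pvLexLe) :
    (PySem.List.insertBy
      (fun a b => decide (a.1 < b.1) || (!decide (b.1 < a.1) && decide (a.2 < b.2))) x ys).Pairwise pvLexLe := by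
  induction ys with
  | nil => simp [PySem.List.insertBy]
  | cons y ys ih =>
    rw [List.pairwise_cons] at h
    obtain ⟨hy, hys⟩ := h
    by_cases hb : (decide (x.1 < y.1) || (!decide (y.1 < x.1) && decide (x.2 < y.2))) = true
    · simp only [PySem.List.insertBy, hb, if_pos]
      have hxy : pvLexLe x y := pvLexLe_of_before hb
      refine List.Pairwise.cons ?_ (List.Pairwise.cons hy hys)
      intro z hz
      rcases hz with _ | hz
      · exact hxy
      · exact pvLexLe_trans hxy (hy z (by assumption))
    · rw [Bool.not_eq_true] at hb
      simp only [PySem.List.insertBy, hb]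
      simp only [Bool.false_eq_true, if_false]
      refine List.Pairwise.cons ?_ (ih hys)
      intro z hz
      rw [PySem.List.insertBy_mem_iff] at hz
      rcases hz with rfl | hz
      · exact pvLexLe_of_not_before hb
      · exact hy z hz

theorem pv_sigCounter_pairwise_lex (w : List Char) : (sigCounter w).Pairwise pvLexLe := by
  unfold sigCounter PySem.List.sorted2
  simp only [Bool.false_eq_true, if_false]
  generalize (PySem.Dict.counter w).items = l
  suffices H : ∀ (l : List (Char × Int)) (acc : List (Char × Int)), acc.Pairwise pvLexLe →
      (l.foldl (fun acc x => PySem.List.insertBy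
        (fun a b => decide (a.1 < b.1) || (!decide (b.1 < a.1) && decide (a.2 < b.2))) x acc) acc).Pairwise pvLexLe by
    exact H l [] (by simp)
  intro l
  induction l with
  | nil => intro acc h; exact h
  | cons x xs ih =>
    intro acc h
    exact ih _ (pv_insertBy_lex_pairwise x acc h)

theorem pv_mem_sigCounter (w : List Char) (p : Char × Int) :
    p ∈ sigCounter w ↔ p.1 ∈ w ∧ p.2 = (w.count p.1 : Int) := by
  unfold sigCounter
  rw [(PySem.List.sorted2_perm _ _ _ _).mem_iff, PySem.Dict.items_counter]
  simp only [List.mem_map, PySem.Set.mem_ofList]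
  constructor
  · rintro ⟨k, hk, rfl⟩; exact ⟨hk, rfl⟩
  · rintro ⟨h1, h2⟩; exact ⟨p.1, h1, by rw [← h2]⟩

theorem pv_sigCounter_fst_nodup (w : List Char) : ((sigCounter w).map Prod.fst).Nodup := by
  unfold sigCounter
  have hperm := (PySem.List.sorted2_perm (PySem.Dict.counter w).items
    (fun p : Char × Int => p.1) (fun p => p.2) false).map Prod.fst
  rw [hperm.nodup_iff]
  have h := PySem.Dict.nodup_keys_counter w
  simpa [PySem.Dict.keys] using h

theorem pv_sigCounter_pairwise_lt (w : List Char) :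
    (sigCounter w).Pairwise (fun a b => a.1 < b.1) := by
  have h1 := pv_sigCounter_pairwise_lex w
  have h2 : (sigCounter w).Pairwise (fun a b : Char × Int => a.1 ≠ b.1) := by
    have h := pv_sigCounter_fst_nodup w
    rw [List.Nodup, List.pairwise_map] at h
    exact h
  refine (h1.and h2).imp ?_
  rintro a b ⟨hle, hne⟩
  rcases hle with h | ⟨he, _⟩
  · exact h
  · exact absurd he hne

-- the sorted Counter-item list is a faithful anagram signature
theorem pv_sigCounter_eq_iff (a b : List Char) : sigCounter a = sigCounter b ↔ a.Perm b := by
  constructor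
  · intro h
    rw [List.perm_iff_count]
    intro c
    by_cases hc : c ∈ a
    · have : ((c, (a.count c : Int)) : Char × Int) ∈ sigCounter a :=
        (pv_mem_sigCounter a (c, a.count c)).mpr ⟨hc, rfl⟩
      rw [h, pv_mem_sigCounter] at this
      have h2 := this.2
      simp only [] at h2
      exact_mod_cast h2
    · by_cases hcb : c ∈ b
      · have : ((c, (b.count c : Int)) : Char × Int) ∈ sigCounter b :=
          (pv_mem_sigCounter b (c, b.count c)).mpr ⟨hcb, rfl⟩
        rw [← h, pv_mem_sigCounter] at this
        exact absurd this.1 hc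
      · rw [List.count_eq_zero_of_not_mem hc, List.count_eq_zero_of_not_mem hcb]
  · intro hp
    have hmem : ∀ p : Char × Int, p ∈ sigCounter a ↔ p ∈ sigCounter b := by
      intro p
      rw [pv_mem_sigCounter, pv_mem_sigCounter, hp.mem_iff, hp.count_eq]
    have hperm : (sigCounter a).Perm (sigCounter b) := by
      refine (List.perm_ext_iff_of_nodup ?_ ?_).mpr hmem
      · have h := pv_sigCounter_pairwise_lt a
        exact h.imp (fun hlt => fun he => by subst he; exact lt_irrefl _ hlt)
      · have h := pv_sigCounter_pairwise_lt b
        exact h.imp (fun hlt => fun he => by subst he; exact lt_irrefl _ hlt)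
    exact hperm.eq_of_pairwise (fun p q _ _ h1 h2 => absurd h2 (lt_asymm h1))
      (pv_sigCounter_pairwise_lt a) (pv_sigCounter_pairwise_lt b)

-- two signature maps with the same equality kernel agree on duplicate-freedom
theorem pv_nodup_map_congr {α β γ : Type} (f : α → β) (g : α → γ)
    (h : ∀ a b : α, f a = f b ↔ g a = g b) (l : List α) :
    (l.map f).Nodup ↔ (l.map g).Nodup := by
  induction l with
  | nil => simp
  | cons x xs ih =>
    simp only [List.map_cons, List.nodup_cons, List.mem_map]
    constructor
    · rintro ⟨h1, h2⟩
      refine ⟨?_, ih.mp h2⟩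
      rintro ⟨a, ha, he⟩
      exact h1 ⟨a, ha, (h a x).mpr he⟩
    · rintro ⟨h1, h2⟩
      refine ⟨?_, ih.mpr h2⟩
      rintro ⟨a, ha, he⟩
      exact h1 ⟨a, ha, (h a x).mp he⟩

-- adjacent scan of a ≤-sorted list detects exactly the duplicates
theorem pv_adjacent_scan {α : Type} [LinearOrder α] [BEq α] [LawfulBEq α] (l : List α)
    (h : l.Pairwise (· ≤ ·)) :
    ((l.zip l.tail).all (fun p => !(p.1 == p.2)) = true) ↔ l.Nodup := by
  induction l with
  | nil => simp
  | cons x xs ih =>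
    cases xs with
    | nil => simp
    | cons y ys =>
      rw [List.pairwise_cons] at h
      obtain ⟨hx, hys⟩ := h
      simp only [List.tail_cons, List.zip_cons_cons, List.all_cons, Bool.and_eq_true,
        Bool.not_eq_true', beq_eq_false_iff_ne, ne_eq]
      rw [show ((y :: ys).zip ys) = ((y :: ys).zip (y :: ys).tail) from rfl, ih hys]
      constructor
      · rintro ⟨hne, hnd⟩
        rw [List.nodup_cons]
        refine ⟨?_, hnd⟩
        intro hmem
        rcases hmem with _ | hmem
        · exact hne rfl
        · have h1 : x ≤ y := hx y (by simp)
          have h2 : y ≤ x := (List.pairwise_cons.mp hys).1 x (by assumption)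
          exact hne (le_antisymm h1 h2)
      · intro hnd
        rw [List.nodup_cons] at hnd
        exact ⟨fun he => hnd.1 (he ▸ List.mem_cons_self ..), hnd.2⟩

theorem pv_main (passphrase : String) : no_anagrams passphrase = no_anagrams_alt passphrase := by
  rw [Bool.eq_iff_iff]
  unfold no_anagrams no_anagrams_alt
  simp only []
  set words := PySem.Str.split₀ passphrase with hw
  rw [← PySem.Set.update_map_eq_foldl_add words (fun w => sigCounter w.toList) PySem.Set.empty,
      PySem.Set.update_empty]
  rw [PySem.List.slice_from _ (by norm_num : (0:Int) ≤ 1)]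
  have hdrop : (Int.toNat 1) = 1 := rfl
  rw [hdrop, List.drop_one]
  have hA : (words.length == (PySem.Set.ofList (words.map fun w => sigCounter w.toList)).length) = true
      ↔ (words.map fun w => sigCounter w.toList).Nodup := by
    rw [beq_iff_eq, ← pv_len_ofList_eq_iff]
    rw [List.length_map]
    exact eq_comm
  rw [hA]
  set L := words.map fun w => sigSorted w.toList with hL
  -- swap the core List-LT instance for the defeq LinearOrder one, so the order lemmas apply
  have hs : @PySem.List.sorted (List Char) (List Char) List.instLT (fun a b => a.decidableLT b) L (fun s => s) false
      = @PySem.List.sorted (List Char) (List Char) List.instLinearOrder.toLT LinearOrder.toDecidableLT L (fun s => s) false := by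
    congr 1
  rw [hs]
  set S := @PySem.List.sorted (List Char) (List Char) List.instLinearOrder.toLT LinearOrder.toDecidableLT L (fun s => s) false with hS
  have hpw : S.Pairwise (· ≤ ·) := PySem.List.sorted_pairwise L (fun s : List Char => s)
  have step1 : (words.map fun w => sigCounter w.toList).Nodup ↔ L.Nodup :=
    pv_nodup_map_congr _ _
      (fun a b => by
        rw [pv_sigCounter_eq_iff]
        unfold sigSorted
        exact (PySem.List.sorted_id_eq_sorted_id_iff_perm a.toList b.toList).symm) words
  have step2 : L.Nodup ↔ S.Nodup :=
    ((@PySem.List.sorted_perm (List Char) (List Char) List.instLinearOrder.toLT LinearOrder.toDecidableLT L (fun s => s) false).nodup_iff).symm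
  have step3 := (pv_adjacent_scan S hpw).symm
  exact (step1.trans step2).trans step3

-- ===== VERDICT (by name: the statement is the Claim_ definition above) =====
theorem no_anagrams_spec : Claim_equal_no_anagrams := by
  intro passphrase _
  unfold Spec_no_anagrams
  exact pv_main passphrase
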